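-- pv_equiv track=rewrite | github.com/zchen0211/leet-code | python/leetcode/dp/1031_max_sum.py | helper_right
-- ===== SOURCE A (Python) =====
-- def helper_right(A, l):
-- 	n = len(A)
-- 	result = [sum(A[n-l:])]
-- 	curr = result[-1]
-- 	for i in range(n-l-1, -1, -1):
-- 		curr = curr + A[i] - A[i+l]
-- 		if curr > result[-1]:
-- 			result.append(curr)
-- 		else:
-- 			result.append(result[-1])
-- 	result = result[::-1]
-- 	return result
-- ===== SOURCE B (Python) =====
-- def helper_right(A, l):
-- 	n = len(A)
-- 	# prefix sums: P[k] = sum of A[:k]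
-- 	P = [0]
-- 	for x in A:
-- 		P.append(P[-1] + x)
-- 	# window sums by start position, rightmost start first;
-- 	# a window reaching past the end of the array is clipped to it
-- 	windows = [P[min(i + l, n)] - P[i] for i in range(max(n - l, 0), -1, -1)]
-- 	# running maximum over the right-to-left window sums, reversed into suffix-max order
-- 	out = []
-- 	best = windows[0]
-- 	for w in windows:
-- 		best = max(best, w)
-- 		out.append(best)
-- 	out.reverse()
-- 	return out
-- ===== Notes on version B (the rewrite author's own statement) =====
-- stated objective: alternative
-- what changed: A's single fused loop with an incremental running-window update and inline running max is split into a prefix-sum table, a comprehension of clipped window sums P[min(i+l,n)]-P[i] over all start positions, and a separate running-max pass reversed at the end; Pre_ excludes negative l, on which both A and B raise IndexError.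
-- intended difference: For n < l < 2n where the dropped prefix A[:2n-l] has nonzero sum (window longer than the array), A's seed slice A[n-l:] wraps around and sums only the last l-n elements, while B clips the oversized window to the whole array and returns [sum(A)], the intended window sum. — e.g. on helper_right([1, 2], 3): A returns [2], B returns [3]
import Mathlib
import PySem

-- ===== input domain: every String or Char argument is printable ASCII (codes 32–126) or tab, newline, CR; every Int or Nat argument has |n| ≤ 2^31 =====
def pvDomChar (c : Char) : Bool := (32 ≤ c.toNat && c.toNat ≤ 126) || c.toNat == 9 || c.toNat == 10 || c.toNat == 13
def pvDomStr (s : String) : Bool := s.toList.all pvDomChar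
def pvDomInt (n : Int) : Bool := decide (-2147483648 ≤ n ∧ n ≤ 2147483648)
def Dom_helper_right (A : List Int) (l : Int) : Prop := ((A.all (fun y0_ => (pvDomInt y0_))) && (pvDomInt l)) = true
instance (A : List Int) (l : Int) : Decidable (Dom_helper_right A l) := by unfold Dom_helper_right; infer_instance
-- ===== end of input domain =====

-- B replaces A's fused incremental-window-plus-running-max loop by a prefix-sum table,
-- a window-sum list and a separate running-max pass (alternative decomposition, same O(n) cost).

-- ===== PORT A =====
-- literal transliteration of A: result list grown by appends, curr updated incrementally;
-- result[::-1] is List.reverse.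
def helper_right (A : List Int) (l : Int) : List Int :=
  let n : Int := A.length
  let result0 : List Int := [(PySem.List.slice A (some (n - l)) none).sum]
  let st := (PySem.List.pyRange (n - l - 1) (-1) (-1)).foldl
      (fun (st : List Int × Int) i =>
        let curr := st.2 + PySem.List.pyGetD A i 0 - PySem.List.pyGetD A (i + l) 0
        let last := PySem.List.pyGetD st.1 (-1) 0
        if curr > last then (st.1 ++ [curr], curr) else (st.1 ++ [last], curr))
      (result0, PySem.List.pyGetD result0 (-1) 0)
  st.1.reverse

-- ===== PORT B =====
-- literal transliteration of Source B: prefix sums P, clipped-window-sum comprehension, running-max pass.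
-- (windows[0] is pyGetD with default 0: inside Pre_ the windows list is nonempty, so exact there.)
def helper_right_alt (A : List Int) (l : Int) : List Int :=
  let n : Int := A.length
  let P := A.foldl (fun P x => P ++ [PySem.List.pyGetD P (-1) 0 + x]) [0]
  let windows := (PySem.List.pyRange (max (n - l) 0) (-1) (-1)).map
      (fun i => PySem.List.pyGetD P (min (i + l) n) 0 - PySem.List.pyGetD P i 0)
  let st := windows.foldl
      (fun (st : List Int × Int) w => (st.1 ++ [max st.2 w], max st.2 w))
      ([], PySem.List.pyGetD windows 0 0)
  st.1.reverse

-- ===== PRECONDITION & SPEC =====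
-- Pre_ excludes l < 0, on which both A and B raise IndexError.
def Pre_helper_right (_A : List Int) (l : Int) : Prop := 0 ≤ l
instance (A : List Int) (l : Int) : Decidable (Pre_helper_right A l) := by unfold Pre_helper_right; infer_instance
def pvWitness_helper_right : List Int × Int := ([1, -2, 3], 2)

-- For n < l < 2n with the dropped prefix summing nonzero (window longer than the array), A's seed
-- slice A[n-l:] wraps around and sums only the last l-n elements, while B clips the oversized window
-- to the whole array and returns [sum(A)], the intended window sum.
def D_helper_right (A : List Int) (l : Int) : Prop :=
  (A.length : Int) < l ∧ l < 2 * (A.length : Int) ∧ (A.take ((2 * (A.length : Int) - l).toNat)).sum ≠ 0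
instance (A : List Int) (l : Int) : Decidable (D_helper_right A l) := by unfold D_helper_right; infer_instance

def Spec_helper_right (A : List Int) (l : Int) (out : List Int) : Prop := ¬ D_helper_right A l → out = helper_right_alt A l
instance (A : List Int) (l : Int) (out : List Int) : Decidable (Spec_helper_right A l out) := by unfold Spec_helper_right; infer_instance

def pvDiffWitness_helper_right : List Int × Int := ([1, 2], 3)
def pvDiffWitnessOut_helper_right : (List Int) × (List Int) := ([2], [3])

-- ===== CLAIM (what is proved, stated in full; the proofs are below) =====
def Claim_unchanged_helper_right : Prop := ∀ (A : List Int) (l : Int), Dom_helper_right A l → Pre_helper_right A l → Spec_helper_right A l (helper_right A l)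
def Claim_changed_helper_right : Prop := Dom_helper_right (pvDiffWitness_helper_right.1) (pvDiffWitness_helper_right.2) ∧ Pre_helper_right (pvDiffWitness_helper_right.1) (pvDiffWitness_helper_right.2) ∧ D_helper_right (pvDiffWitness_helper_right.1) (pvDiffWitness_helper_right.2) ∧ helper_right (pvDiffWitness_helper_right.1) (pvDiffWitness_helper_right.2) = pvDiffWitnessOut_helper_right.1 ∧ helper_right_alt (pvDiffWitness_helper_right.1) (pvDiffWitness_helper_right.2) = pvDiffWitnessOut_helper_right.2 ∧ pvDiffWitnessOut_helper_right.1 ≠ pvDiffWitnessOut_helper_right.2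
def Claim_exact_helper_right : Prop := ∀ (A : List Int) (l : Int), Dom_helper_right A l → Pre_helper_right A l → D_helper_right A l → helper_right A l ≠ helper_right_alt A l

-- ===== LEMMAS AND PROOFS =====

-- running prefix sums starting after accumulated value s
def presums : Int → List Int → List Int
  | _, [] => []
  | s, x :: t => (s + x) :: presums (s + x) t

-- running maxima starting from b
def runmax : Int → List Int → List Int
  | _, [] => []
  | b, w :: t => max b w :: runmax (max b w) t

-- the sequence of curr values A's loop produces over an index list
def currs (f g : Int → Int) : Int → List Int → List Int
  | _, [] => []
  | c, i :: t => (c + f i - g i) :: currs f g (c + f i - g i) t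

theorem length_presums (s : Int) (xs : List Int) : (presums s xs).length = xs.length := by
  induction xs generalizing s with
  | nil => rfl
  | cons x t ih => simp [presums, ih]

theorem presums_getElem (xs : List Int) (s : Int) (k : Nat) (hk : k < xs.length) :
    (presums s xs)[k]'(by simpa [length_presums]) = s + (xs.take (k + 1)).sum := by
  induction xs generalizing s k with
  | nil => simp at hk
  | cons x t ih =>
    cases k with
    | zero => simp [presums]
    | succ k =>
      simp only [presums, List.getElem_cons_succ, List.take_succ_cons, List.sum_cons]
      rw [ih (s + x) k (by simpa using hk)]
      ring

-- A's loop body, closed over A and l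
theorem foldA_spec (f g : Int → Int) (L : List Int) :
    ∀ (res : List Int) (c : Int) (hres : res ≠ []),
    (L.foldl (fun (st : List Int × Int) i =>
        let curr := st.2 + f i - g i
        let last := PySem.List.pyGetD st.1 (-1) 0
        if curr > last then (st.1 ++ [curr], curr) else (st.1 ++ [last], curr))
      (res, c)).1 = res ++ runmax (res.getLast hres) (currs f g c L) := by
  induction L with
  | nil => intro res c hres; simp [runmax, currs]
  | cons i t ih =>
    intro res c hres
    simp only [List.foldl_cons]
    rw [PySem.List.pyGetD_neg_one res 0 hres]
    by_cases h : c + f i - g i > res.getLast hres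
    · simp only [h, if_pos]
      rw [ih (res ++ [c + f i - g i]) _ (by simp)]
      have hmax : max (res.getLast hres) (c + f i - g i) = c + f i - g i := by omega
      simp [currs, runmax, hmax]
    · simp only [h, if_neg, not_false_iff]
      rw [ih (res ++ [res.getLast hres]) _ (by simp)]
      have hmax : max (res.getLast hres) (c + f i - g i) = res.getLast hres := by omega
      simp [currs, runmax, hmax]

theorem foldB_scan (cs : List Int) :
    ∀ (out : List Int) (b : Int),
    (cs.foldl (fun (st : List Int × Int) w => (st.1 ++ [max st.2 w], max st.2 w)) (out, b)).1
      = out ++ runmax b cs := by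
  induction cs with
  | nil => intro out b; simp [runmax]
  | cons w t ih => intro out b; simp only [List.foldl_cons]; rw [ih]; simp [runmax]

theorem foldP_spec (xs : List Int) :
    ∀ (ps : List Int) (hps : ps ≠ []),
    xs.foldl (fun P x => P ++ [PySem.List.pyGetD P (-1) 0 + x]) ps
      = ps ++ presums (ps.getLast hps) xs := by
  induction xs with
  | nil => intro ps hps; simp [presums]
  | cons x t ih =>
    intro ps hps
    simp only [List.foldl_cons]
    rw [PySem.List.pyGetD_neg_one ps 0 hps, ih (ps ++ [ps.getLast hps + x]) (by simp)]
    simp [presums]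

-- value of B's prefix-sum table at index 0 ≤ j ≤ len A
theorem P_val (A : List Int) (j : Int) (h0 : 0 ≤ j) (hj : j ≤ (A.length : Int)) :
    PySem.List.pyGetD (A.foldl (fun P x => P ++ [PySem.List.pyGetD P (-1) 0 + x]) [0]) j 0
      = (A.take j.toNat).sum := by
  rw [foldP_spec A [0] (by simp)]
  have hlen : (([0] : List Int) ++ presums (([0] : List Int).getLast (by simp)) A).length
      = A.length + 1 := by simp [length_presums]
  rw [PySem.List.pyGetD_eq_getElem _ 0 h0 (by rw [hlen]; omega)]
  simp only [List.getLast_singleton]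
  rcases Nat.eq_zero_or_pos j.toNat with hz | hpos
  · simp [hz]
  · obtain ⟨k, hk⟩ : ∃ k, j.toNat = k + 1 := ⟨j.toNat - 1, by omega⟩
    have hklt : k < A.length := by omega
    have : (([0] : List Int) ++ presums 0 A)[j.toNat]'(by simp [length_presums]; omega)
        = (presums 0 A)[k]'(by simpa [length_presums]) := by
      simp [hk]
    rw [this, presums_getElem A 0 k hklt]
    simp [hk]

-- abbreviation for B's window-sum value (the proofs' own shorthand)
def Wsum (A : List Int) (l i : Int) : Int :=
  PySem.List.pyGetD (A.foldl (fun P x => P ++ [PySem.List.pyGetD P (-1) 0 + x]) [0]) (i + l) 0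
    - PySem.List.pyGetD (A.foldl (fun P x => P ++ [PySem.List.pyGetD P (-1) 0 + x]) [0]) i 0

theorem Wsum_step (A : List Int) (l i : Int) (hl : 0 ≤ l) (hi : 0 ≤ i)
    (hub : i ≤ (A.length : Int) - l - 1) :
    Wsum A l (i + 1) + PySem.List.pyGetD A i 0 - PySem.List.pyGetD A (i + l) 0 = Wsum A l i := by
  have hn : i + l < (A.length : Int) := by omega
  have hi' : i < (A.length : Int) := by omega
  unfold Wsum
  rw [P_val A (i + 1 + l) (by omega) (by omega), P_val A (i + 1) (by omega) (by omega),
      P_val A (i + l) (by omega) (by omega), P_val A i (by omega) (by omega),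
      PySem.List.pyGetD_eq_getElem A 0 hi hi',
      PySem.List.pyGetD_eq_getElem A 0 (by omega) hn]
  have e1 : (i + 1 + l).toNat = (i + l).toNat + 1 := by omega
  have e2 : (i + 1).toNat = i.toNat + 1 := by omega
  rw [e1, e2, List.sum_take_succ _ _ (by omega), List.sum_take_succ _ _ (by omega)]
  ring

theorem Wsum_seed (A : List Int) (l : Int) (hl : 0 ≤ l) (hln : l ≤ (A.length : Int)) :
    (PySem.List.slice A (some ((A.length : Int) - l)) none).sum = Wsum A l ((A.length : Int) - l) := by
  unfold Wsum
  rw [PySem.List.slice_from A (by omega)]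
  have : (A.length : Int) - l + l = (A.length : Int) := by ring
  rw [this, P_val A (A.length : Int) (by omega) (by omega),
      P_val A ((A.length : Int) - l) (by omega) (by omega)]
  have : ((A.length : Int)).toNat = A.length := by omega
  rw [this, List.take_length]
  have := List.sum_take_add_sum_drop A ((A.length : Int) - l).toNat
  omega

theorem currs_eq (A : List Int) (l : Int) (hl : 0 ≤ l) :
    ∀ (k : Nat) (a : Int), a = (k : Int) - 1 → a ≤ (A.length : Int) - l - 1 →
    currs (fun i => PySem.List.pyGetD A i 0) (fun i => PySem.List.pyGetD A (i + l) 0)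
        (Wsum A l (a + 1)) (PySem.List.pyRange a (-1) (-1))
      = (PySem.List.pyRange a (-1) (-1)).map (Wsum A l) := by
  intro k
  induction k with
  | zero =>
    intro a ha _
    rw [PySem.List.pyRange_neg_one_eq_nil (by omega)]
    rfl
  | succ k ih =>
    intro a ha hub
    rw [PySem.List.pyRange_neg_one_cons (by omega)]
    simp only [currs, List.map_cons]
    rw [Wsum_step A l a hl (by omega) hub]
    have h2 := ih (a - 1) (by omega) (by omega)
    rw [show a - 1 + 1 = a by ring] at h2
    rw [h2]

-- on indices of a countdown range that stays within n - l, the clip min (i+l) n is a no-op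
theorem map_min_congr (P : List Int) (l n a : Int) (ha : a ≤ n - l) :
    (PySem.List.pyRange a (-1) (-1)).map
        (fun i => PySem.List.pyGetD P (min (i + l) n) 0 - PySem.List.pyGetD P i 0)
      = (PySem.List.pyRange a (-1) (-1)).map
        (fun i => PySem.List.pyGetD P (i + l) 0 - PySem.List.pyGetD P i 0) := by
  apply List.map_congr_left
  intro i hi
  rw [PySem.List.mem_pyRange_neg_one] at hi
  have hmin : min (i + l) n = i + l := by omega
  rw [hmin]

-- for l > n A's loop range is empty: its result is just the wrapped seed slice's sum
theorem A_overlong (A : List Int) (l : Int) (hln : (A.length : Int) < l) :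
    helper_right A l = [(A.drop (A.length - (l - (A.length : Int)).toNat)).sum] := by
  unfold helper_right
  simp only []
  rw [PySem.List.pyRange_neg_one_eq_nil (show (A.length : Int) - l - 1 ≤ -1 by omega)]
  rw [show (A.length : Int) - l = -(((l - (A.length : Int)).toNat : Int)) by omega,
      PySem.List.slice_from_neg_natCast A (l - (A.length : Int)).toNat (by omega)]
  simp

-- for l > n B has a single clipped window covering the whole array
theorem B_overlong (A : List Int) (l : Int) (hln : (A.length : Int) < l) :
    helper_right_alt A l = [A.sum] := by
  unfold helper_right_alt
  simp only []
  rw [show max ((A.length : Int) - l) 0 = 0 by omega]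
  rw [PySem.List.pyRange_neg_one_cons (show (-1 : Int) < 0 by omega),
      PySem.List.pyRange_neg_one_eq_nil (show (0 : Int) - 1 ≤ -1 by omega)]
  simp only [List.map_cons, List.map_nil, PySem.List.pyGetD_zero_cons]
  rw [show min (0 + l) ((A.length : Int)) = (A.length : Int) by omega]
  rw [P_val A (A.length : Int) (by omega) (le_refl _), P_val A 0 (by omega) (by omega)]
  simp only [Int.toNat_zero, List.take_zero, List.sum_nil, sub_zero, Int.toNat_natCast,
    List.take_length]
  rw [foldB_scan]
  simp [runmax]

-- ===== VERDICT (by name: the statement is the Claim_ definition above) =====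
theorem helper_right_spec : Claim_unchanged_helper_right := by
  intro A l _hDom hl
  unfold Spec_helper_right
  intro hD
  unfold D_helper_right at hD
  push Not at hD
  by_cases hln : l ≤ (A.length : Int)
  · -- in-range window length: the clip is a no-op and the two computations align
    unfold helper_right helper_right_alt
    simp only []
    set n : Int := (A.length : Int) with hn
    set seed := (PySem.List.slice A (some (n - l)) none).sum with hseed
    rw [foldA_spec (fun i => PySem.List.pyGetD A i 0) (fun i => PySem.List.pyGetD A (i + l) 0)
        (PySem.List.pyRange (n - l - 1) (-1) (-1)) [seed] _ (by simp)]
    rw [PySem.List.pyGetD_neg_one [seed] 0 (by simp)]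
    rw [show max (n - l) 0 = n - l by omega]
    rw [map_min_congr _ l n (n - l) (le_refl _)]
    rw [PySem.List.pyRange_neg_one_cons (show (-1 : Int) < n - l by omega)]
    simp only [List.map_cons, PySem.List.pyGetD_zero_cons]
    rw [foldB_scan]
    simp only [List.getLast_singleton, List.singleton_append, List.nil_append]
    have hseedW : seed = Wsum A l (n - l) := Wsum_seed A l hl hln
    have hcurrs : currs (fun i => PySem.List.pyGetD A i 0) (fun i => PySem.List.pyGetD A (i + l) 0)
        seed (PySem.List.pyRange (n - l - 1) (-1) (-1))
        = (PySem.List.pyRange (n - l - 1) (-1) (-1)).map (Wsum A l) := by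
      have h2 := currs_eq A l hl (n - l).toNat (n - l - 1) (by omega) (by omega)
      rw [show n - l - 1 + 1 = n - l by ring] at h2
      rw [hseedW]
      exact h2
    rw [hcurrs, hseedW]
    simp only [runmax, max_self]
    rfl
  · -- window longer than the array: outside D_ the wrapped seed still sums to the whole array
    rw [A_overlong A l (by omega), B_overlong A l (by omega)]
    have hsplit := List.sum_take_add_sum_drop A (A.length - (l - (A.length : Int)).toNat)
    have htake : (A.take (A.length - (l - (A.length : Int)).toNat)).sum = 0 := by
      by_cases h2 : l < 2 * (A.length : Int)
      · have h0 := hD (by omega) h2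
        have hidx : (2 * (A.length : Int) - l).toNat
            = A.length - (l - (A.length : Int)).toNat := by omega
        rw [hidx] at h0
        omega
      · rw [show A.length - (l - (A.length : Int)).toNat = 0 by omega]
        simp
    rw [List.cons.injEq]
    refine ⟨by omega, rfl⟩

theorem helper_right_changed : Claim_changed_helper_right := by
  unfold Claim_changed_helper_right; decide

theorem helper_right_tight : Claim_exact_helper_right := by
  intro A l _hDom hl hD
  unfold D_helper_right at hD
  obtain ⟨h1, h2, h3⟩ := hD
  rw [A_overlong A l h1, B_overlong A l h1]
  intro heq
  rw [List.cons.injEq] at heq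
  have hdrop := heq.1
  have hsplit := List.sum_take_add_sum_drop A (A.length - (l - (A.length : Int)).toNat)
  apply h3
  rw [show (2 * (A.length : Int) - l).toNat = A.length - (l - (A.length : Int)).toNat by omega]
  omega
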